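-- pv_equiv track=rewrite | github.com/scaboodles/Advent-of-Code-2022 | day8/day8.py | findBestTree
-- ===== SOURCE A (Python) =====
-- def findBestTree(grid):
--     highestVis = 0
--     y,x = 0,0
--     for i in range(len(grid)):
--         for j in range(len(grid[i])):
--             treeVis = calculateVis(i,j,grid)
--             if treeVis > highestVis:
--                 highestVis = treeVis
--                 y,x = i,j
--     return highestVis
--
-- def calculateVis(i, j, grid):
--     rightVis = calcRightVis(i,j,grid)
--     leftVis = calcLeftVis(i,j,grid)
--     topVis = calcTopVis(i,j,grid)
--     botVis = calcBotVis(i,j,grid)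
--     return botVis*topVis*rightVis*leftVis
--
-- def calcRightVis(i,j,grid):
--     vis = 1
--     height = grid[i][j]
--     for x in range(len(grid[i]) - j - 1):
--         index = j+x+1
--         if grid[i][index] < height:
--             if index < len(grid[i])-1:
--                 vis+=1
--         else:
--             return vis
--     return vis
--
-- def calcLeftVis(i,j,grid):
--     vis = 1
--     height = grid[i][j]
--     for x in range(j):
--         index = j-x-1
--         if grid[i][index] < height:
--             if index > 0:
--                 vis+=1
--         else:
--             return vis
--     return vis
--
-- def calcTopVis(i,j,grid):
--     vis = 1
--     height = grid[i][j]
--     for y in range(i):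
--         index = i-y-1
--         if grid[index][j] < height:
--             if index > 0:
--                 vis+=1
--         else:
--             return vis
--     return vis
--
-- def calcBotVis(i,j,grid):
--     vis = 1
--     height = grid[i][j]
--     for y in range(len(grid) - i - 1):
--         index = y+i+1
--         if grid[index][j] < height:
--             if index < len(grid) - 1:
--                 vis+=1
--         else:
--             return vis
--     return vis
-- ===== SOURCE B (Python) =====
-- def findBestTree(grid):
--     # Monotonic-stack viewing distances per row/column (O(rows*cols) staged passes),
--     # per-direction factor max(dist, 1) matching the original's edge handling.
--     def viewdists(seq):
--         # out[k] = distance from k back to the nearest earlier index with height >= seq[k],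
--         # or k (distance to the edge) if there is none; classic monotonic stack.
--         out = []
--         stack = []
--         for k in range(len(seq)):
--             h = seq[k]
--             while stack and seq[stack[-1]] < h:
--                 stack.pop()
--             out.append(k - stack[-1] if stack else k)
--             stack.append(k)
--         return out
--
--     m = len(grid[0]) if grid else 0
--     cols = [[row[j] for row in grid] for j in range(m)]
--     left = [viewdists(row) for row in grid]
--     right = [viewdists(row[::-1])[::-1] for row in grid]
--     up = [viewdists(col) for col in cols]
--     down = [viewdists(col[::-1])[::-1] for col in cols]
--     best = 0
--     for i in range(len(grid)):
--         for j in range(len(grid[i])):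
--             s = max(left[i][j], 1) * max(right[i][j], 1) * max(up[j][i], 1) * max(down[j][i], 1)
--             best = max(best, s)
--     return best
-- ===== Notes on version B (the rewrite author's own statement) =====
-- stated objective: faster
-- what changed: Replaces A's per-cell four-direction rescans by four staged monotonic-stack passes over rows and columns that compute every viewing distance once (nearest previous >= element), then one product/max sweep; per-direction factor is max(dist,1), the closed form of A's edge adjustment.
import Mathlib
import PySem

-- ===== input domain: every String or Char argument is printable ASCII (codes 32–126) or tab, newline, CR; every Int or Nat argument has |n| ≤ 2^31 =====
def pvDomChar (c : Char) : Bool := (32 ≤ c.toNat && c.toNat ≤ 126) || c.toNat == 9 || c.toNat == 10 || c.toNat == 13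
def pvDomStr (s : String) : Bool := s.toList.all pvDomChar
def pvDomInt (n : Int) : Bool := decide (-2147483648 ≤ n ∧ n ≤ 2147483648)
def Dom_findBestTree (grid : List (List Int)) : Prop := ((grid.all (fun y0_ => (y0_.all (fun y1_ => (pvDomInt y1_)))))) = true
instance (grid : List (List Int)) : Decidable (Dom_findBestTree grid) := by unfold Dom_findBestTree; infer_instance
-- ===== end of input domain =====

-- ===== PORT A =====
-- B change: four staged monotonic-stack passes compute every viewing distance once
-- (objective: faster, O(N*M) instead of per-cell four-direction rescans).
-- Note: indexing is ported with getD (exact on Pre_: rectangular grids; on ragged grids Python A raises IndexError).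
def pvGet (grid : List (List Int)) (i j : Nat) : Int := (grid.getD i []).getD j 0

def calcRightVisAux (row : List Int) (h : Int) (j : Nat) : Nat → Nat → Int → Int
  | _, 0, vis => vis
  | x, n+1, vis =>
    let index := j + x + 1
    if row.getD index 0 < h then
      if index < row.length - 1 then calcRightVisAux row h j (x+1) n (vis+1)
      else calcRightVisAux row h j (x+1) n vis
    else vis

def calcRightVis (i j : Nat) (grid : List (List Int)) : Int :=
  let row := grid.getD i []
  calcRightVisAux row (pvGet grid i j) j 0 (row.length - j - 1) 1

def calcLeftVisAux (row : List Int) (h : Int) (j : Nat) : Nat → Nat → Int → Int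
  | _, 0, vis => vis
  | x, n+1, vis =>
    let index := j - x - 1
    if row.getD index 0 < h then
      if 0 < index then calcLeftVisAux row h j (x+1) n (vis+1)
      else calcLeftVisAux row h j (x+1) n vis
    else vis

def calcLeftVis (i j : Nat) (grid : List (List Int)) : Int :=
  let row := grid.getD i []
  calcLeftVisAux row (pvGet grid i j) j 0 j 1

def calcTopVisAux (grid : List (List Int)) (h : Int) (i j : Nat) : Nat → Nat → Int → Int
  | _, 0, vis => vis
  | y, n+1, vis =>
    let index := i - y - 1
    if pvGet grid index j < h then
      if 0 < index then calcTopVisAux grid h i j (y+1) n (vis+1)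
      else calcTopVisAux grid h i j (y+1) n vis
    else vis

def calcTopVis (i j : Nat) (grid : List (List Int)) : Int :=
  calcTopVisAux grid (pvGet grid i j) i j 0 i 1

def calcBotVisAux (grid : List (List Int)) (h : Int) (i j : Nat) : Nat → Nat → Int → Int
  | _, 0, vis => vis
  | y, n+1, vis =>
    let index := i + y + 1
    if pvGet grid index j < h then
      if index < grid.length - 1 then calcBotVisAux grid h i j (y+1) n (vis+1)
      else calcBotVisAux grid h i j (y+1) n vis
    else vis

def calcBotVis (i j : Nat) (grid : List (List Int)) : Int :=
  calcBotVisAux grid (pvGet grid i j) i j 0 (grid.length - i - 1) 1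

def calculateVis (i j : Nat) (grid : List (List Int)) : Int :=
  let rightVis := calcRightVis i j grid
  let leftVis := calcLeftVis i j grid
  let topVis := calcTopVis i j grid
  let botVis := calcBotVis i j grid
  botVis * topVis * rightVis * leftVis

def findBestTree (grid : List (List Int)) : Int :=
  (List.range grid.length).foldl (fun acc i =>
    (List.range (grid.getD i []).length).foldl (fun acc j =>
      let treeVis := calculateVis i j grid
      if treeVis > acc then treeVis else acc) acc) 0

-- ===== PORT B =====
-- Python's stack (append/pop at the list's end) is ported top-first: head = Python's stack[-1].
def popLoop (seq : List Int) (h : Int) : List Nat → List Nat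
  | [] => []
  | t :: rest => if seq.getD t 0 < h then popLoop seq h rest else t :: rest

-- the `for k in range(len(seq))` loop of viewdists; out.append becomes emitting in order
def vdAux (seq : List Int) : List Nat → List Nat → List Int
  | [], _ => []
  | k :: ks, stack =>
    let h := seq.getD k 0
    let stack' := popLoop seq h stack
    let d : Int := match stack' with
      | [] => (k : Int)
      | t :: _ => (k : Int) - (t : Int)
    d :: vdAux seq ks (k :: stack')

def viewdists (seq : List Int) : List Int := vdAux seq (List.range seq.length) []

def findBestTree_alt (grid : List (List Int)) : Int :=
  let m := (grid.headD []).length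
  let cols := (List.range m).map (fun j => grid.map (fun row => row.getD j 0))
  let left := grid.map (fun row => viewdists row)
  let right := grid.map (fun row => (viewdists row.reverse).reverse)
  let up := cols.map (fun col => viewdists col)
  let down := cols.map (fun col => (viewdists col.reverse).reverse)
  (List.range grid.length).foldl (fun best i =>
    (List.range (grid.getD i []).length).foldl (fun best j =>
      let s := max ((left.getD i []).getD j 0) 1 * max ((right.getD i []).getD j 0) 1 *
               max ((up.getD j []).getD i 0) 1 * max ((down.getD j []).getD i 0) 1
      max best s) best) 0

-- ===== PRECONDITION & SPEC =====
-- Pre_ excludes exactly the ragged grids, on which Python A raises IndexError (column scans access grid[k][j] unconditionally).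
def Pre_findBestTree (grid : List (List Int)) : Prop :=
  ∀ row ∈ grid, row.length = (grid.headD []).length
instance (grid : List (List Int)) : Decidable (Pre_findBestTree grid) := by unfold Pre_findBestTree; infer_instance
def pvWitness_findBestTree : List (List Int) := [[3, 0, 3], [2, 5, 5], [6, 5, 3]]

def Spec_findBestTree (grid : List (List Int)) (out : Int) : Prop := out = findBestTree_alt grid
instance (grid : List (List Int)) (out : Int) : Decidable (Spec_findBestTree grid out) := by unfold Spec_findBestTree; infer_instance

-- ===== CLAIM (what is proved, stated in full; the proofs are below) =====
def Claim_equal_findBestTree : Prop := ∀ (grid : List (List Int)), Dom_findBestTree grid → Pre_findBestTree grid → Spec_findBestTree grid (findBestTree grid)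


-- ===== LEMMAS AND PROOFS =====

-- A's per-direction value, closed form: viewDist h s = max(d,1) where d is the viewing distance along slice s.
def lowerPrefix (h : Int) : List Int → Nat
  | [] => 0
  | v :: rest => if v ≥ h then 0 else lowerPrefix h rest + 1

def viewDist (h : Int) (seq : List Int) : Int :=
  let t := lowerPrefix h seq
  if t < seq.length then (t : Int) + 1 else max (t : Int) 1

def colUp (grid : List (List Int)) (i j : Nat) : List Int :=
  ((List.range i).map (fun k => (grid.getD k []).getD j 0)).reverse

def colDown (grid : List (List Int)) (i j : Nat) : List Int :=
  (List.range' (i+1) (grid.length - (i+1))).map (fun k => (grid.getD k []).getD j 0)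

-- The common shape of A's four scan loops, as a recursion on the outward slice.
def gScan (h : Int) : List Int → Int → Int
  | [], vis => vis
  | v :: rest, vis =>
    if v < h then (if rest.length = 0 then gScan h rest vis else gScan h rest (vis + 1)) else vis

theorem gScan_cons (h v : Int) (rest : List Int) (vis : Int) :
    gScan h (v :: rest) vis =
      if v < h then (if rest.length = 0 then gScan h rest vis else gScan h rest (vis + 1)) else vis := rfl

theorem lowerPrefix_le_length (h : Int) (s : List Int) : lowerPrefix h s ≤ s.length := by
  induction s with
  | nil => simp [lowerPrefix]
  | cons a l ih =>
    by_cases ha : a ≥ h <;> simp [lowerPrefix, ha]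
    omega

theorem viewDist_cons_lower (h v : Int) (rest : List Int) (hv : v < h) (hne : rest ≠ []) :
    viewDist h (v :: rest) = viewDist h rest + 1 := by
  have hlp := lowerPrefix_le_length h rest
  have h0 : 0 < rest.length := List.length_pos_iff.mpr hne
  simp only [viewDist, lowerPrefix, not_le.mpr hv, if_false, List.length_cons]
  by_cases hlt : lowerPrefix h rest < rest.length <;>
    simp only [hlt, Nat.add_lt_add_iff_right, if_pos] <;> push_cast <;> omega

theorem gScan_eq_viewDist (h : Int) (s : List Int) : ∀ vis : Int,
    gScan h s vis = vis - 1 + viewDist h s := by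
  induction s with
  | nil => intro vis; simp [gScan, viewDist, lowerPrefix]
  | cons v rest ih =>
    intro vis
    by_cases hv : v < h
    · rcases rest with _ | ⟨w, rest'⟩
      · simp [gScan, viewDist, lowerPrefix, hv, not_le.mpr hv]
      · rw [viewDist_cons_lower h v _ hv (by simp), gScan_cons]
        simp only [hv, if_pos, List.length_cons, Nat.add_one_ne_zero, ite_false]
        rw [ih (vis + 1)]; ring
    · have hge : v ≥ h := le_of_not_gt hv
      simp [gScan, hv, viewDist, lowerPrefix, hge]

theorem calcRightVisAux_eq (row : List Int) (h : Int) (j : Nat) :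
    ∀ n x vis, j + 1 + x + n = row.length →
      calcRightVisAux row h j x n vis = gScan h (row.drop (j + 1 + x)) vis := by
  intro n
  induction n with
  | zero =>
    intro x vis hinv
    have hnil : row.drop (j + 1 + x) = [] := List.drop_eq_nil_of_le (by omega)
    simp [calcRightVisAux, hnil, gScan]
  | succ n ih =>
    intro x vis hinv
    have hidx : j + 1 + x < row.length := by omega
    have hcons : row.drop (j + 1 + x) = row[j + 1 + x] :: row.drop (j + 1 + x + 1) :=
      List.drop_eq_getElem_cons hidx
    have hget : row.getD (j + x + 1) 0 = row[j + 1 + x] := by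
      rw [show j + x + 1 = j + 1 + x by omega]
      exact List.getD_eq_getElem row 0 hidx
    have hlenrest : (row.drop (j + 1 + x + 1)).length = n := by
      simp [List.length_drop]; omega
    by_cases hv : row[j + 1 + x] < h
    · rcases Nat.eq_zero_or_pos n with hn | hn
      · subst hn
        have hend : ¬ (j + x + 1 < row.length - 1) := by omega
        have hrest : row.drop (j + 1 + x + 1) = [] := List.length_eq_zero_iff.mp hlenrest
        simp only [calcRightVisAux, hget, hv, if_pos, hend, if_neg, not_false_iff]
        rw [hcons, hrest, gScan_cons]
        simp [gScan, hv]
      · have hmid : j + x + 1 < row.length - 1 := by omega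
        simp only [calcRightVisAux, hget, hv, hmid, if_pos]
        rw [ih (x + 1) (vis + 1) (by omega), hcons]
        have hne : (row.drop (j + 1 + x + 1)).length ≠ 0 := by omega
        rw [gScan_cons]
        simp only [hv, if_pos, hne, ite_false]
        rw [show j + 1 + (x + 1) = j + 1 + x + 1 by omega]
    · simp only [calcRightVisAux, hget, hv, if_neg, not_false_iff]
      rw [hcons, gScan_cons]; simp [hv]

theorem calcLeftVisAux_eq (row : List Int) (h : Int) (j : Nat) (hjL : j ≤ row.length) :
    ∀ n x vis, x + n = j →
      calcLeftVisAux row h j x n vis = gScan h (((row.take j).reverse).drop x) vis := by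
  have hlen : ((row.take j).reverse).length = j := by simp [List.length_take, Nat.min_eq_left hjL]
  intro n
  induction n with
  | zero =>
    intro x vis hinv
    have hnil : ((row.take j).reverse).drop x = [] := List.drop_eq_nil_of_le (by omega)
    simp [calcLeftVisAux, hnil, gScan]
  | succ n ih =>
    intro x vis hinv
    have hidx : x < ((row.take j).reverse).length := by omega
    have hcons : ((row.take j).reverse).drop x =
        ((row.take j).reverse)[x] :: ((row.take j).reverse).drop (x + 1) :=
      List.drop_eq_getElem_cons hidx
    have hjx : j - 1 - x < (row.take j).length := by simp [List.length_take]; omega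
    have helem : ((row.take j).reverse)[x] = row[j - 1 - x]'(by omega) := by
      rw [List.getElem_reverse]
      simp only [List.getElem_take]
      congr 1
      simp [List.length_take, Nat.min_eq_left hjL]
    have hget : row.getD (j - x - 1) 0 = row[j - 1 - x]'(by omega) := by
      rw [show j - x - 1 = j - 1 - x by omega]
      exact List.getD_eq_getElem row 0 (by omega)
    have hlenrest : (((row.take j).reverse).drop (x + 1)).length = n := by
      simp [List.length_drop, hlen]; omega
    by_cases hv : row[j - 1 - x]'(by omega) < h
    · rcases Nat.eq_zero_or_pos n with hn | hn
      · subst hn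
        have hend : ¬ (0 < j - x - 1) := by omega
        have hrest : ((row.take j).reverse).drop (x + 1) = [] := List.length_eq_zero_iff.mp hlenrest
        simp only [calcLeftVisAux, hget, hv, if_pos, hend, if_neg, not_false_iff]
        rw [hcons, helem, hrest, gScan_cons]
        simp [gScan, hv]
      · have hmid : 0 < j - x - 1 := by omega
        simp only [calcLeftVisAux, hget, hv, hmid, if_pos]
        rw [ih (x + 1) (vis + 1) (by omega), hcons, helem, gScan_cons]
        simp only [hv, if_pos, hlenrest, Nat.pos_iff_ne_zero.mp hn, ite_false]
    · simp only [calcLeftVisAux, hget, hv, if_neg, not_false_iff]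
      rw [hcons, helem, gScan_cons]; simp [hv]

theorem calcTopVisAux_eq (grid : List (List Int)) (h : Int) (i j : Nat) :
    ∀ n y vis, y + n = i →
      calcTopVisAux grid h i j y n vis = gScan h ((colUp grid i j).drop y) vis := by
  have hlen : (colUp grid i j).length = i := by simp [colUp]
  intro n
  induction n with
  | zero =>
    intro y vis hinv
    have hnil : (colUp grid i j).drop y = [] := List.drop_eq_nil_of_le (by omega)
    simp [calcTopVisAux, hnil, gScan]
  | succ n ih =>
    intro y vis hinv
    have hidx : y < (colUp grid i j).length := by omega
    have hcons : (colUp grid i j).drop y =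
        (colUp grid i j)[y] :: (colUp grid i j).drop (y + 1) :=
      List.drop_eq_getElem_cons hidx
    have helem : (colUp grid i j)[y] = pvGet grid (i - y - 1) j := by
      simp only [colUp, List.getElem_reverse, List.getElem_map, List.getElem_range,
        List.length_map, List.length_range]
      rw [show i - 1 - y = i - y - 1 from by omega]
      rfl
    have hlenrest : ((colUp grid i j).drop (y + 1)).length = n := by
      simp [List.length_drop, hlen]; omega
    by_cases hv : pvGet grid (i - y - 1) j < h
    · rcases Nat.eq_zero_or_pos n with hn | hn
      · subst hn
        have hend : ¬ (0 < i - y - 1) := by omega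
        have hrest : (colUp grid i j).drop (y + 1) = [] := List.length_eq_zero_iff.mp hlenrest
        simp only [calcTopVisAux, hv, if_pos, hend, if_neg, not_false_iff]
        rw [hcons, helem, hrest, gScan_cons]
        simp [gScan, hv]
      · have hmid : 0 < i - y - 1 := by omega
        simp only [calcTopVisAux, hv, hmid, if_pos]
        rw [ih (y + 1) (vis + 1) (by omega), hcons, helem, gScan_cons]
        simp only [hv, if_pos, hlenrest, Nat.pos_iff_ne_zero.mp hn, ite_false]
    · simp only [calcTopVisAux, hv, if_neg, not_false_iff]
      rw [hcons, helem, gScan_cons]; simp [hv]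

theorem calcBotVisAux_eq (grid : List (List Int)) (h : Int) (i j : Nat) :
    ∀ n y vis, i + 1 + y + n = grid.length →
      calcBotVisAux grid h i j y n vis = gScan h ((colDown grid i j).drop y) vis := by
  have hlen : (colDown grid i j).length = grid.length - (i + 1) := by simp [colDown]
  intro n
  induction n with
  | zero =>
    intro y vis hinv
    have hnil : (colDown grid i j).drop y = [] := List.drop_eq_nil_of_le (by omega)
    simp [calcBotVisAux, hnil, gScan]
  | succ n ih =>
    intro y vis hinv
    have hidx : y < (colDown grid i j).length := by omega
    have hcons : (colDown grid i j).drop y =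
        (colDown grid i j)[y] :: (colDown grid i j).drop (y + 1) :=
      List.drop_eq_getElem_cons hidx
    have helem : (colDown grid i j)[y] = pvGet grid (i + y + 1) j := by
      simp only [colDown, List.getElem_map, List.getElem_range']
      rw [show i + 1 + 1 * y = i + y + 1 from by omega]
      rfl
    have hlenrest : ((colDown grid i j).drop (y + 1)).length = n := by
      simp [List.length_drop, hlen]; omega
    by_cases hv : pvGet grid (i + y + 1) j < h
    · rcases Nat.eq_zero_or_pos n with hn | hn
      · subst hn
        have hend : ¬ (i + y + 1 < grid.length - 1) := by omega
        have hrest : (colDown grid i j).drop (y + 1) = [] := List.length_eq_zero_iff.mp hlenrest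
        simp only [calcBotVisAux, hv, if_pos, hend, if_neg, not_false_iff]
        rw [hcons, helem, hrest, gScan_cons]
        simp [gScan, hv]
      · have hmid : i + y + 1 < grid.length - 1 := by omega
        simp only [calcBotVisAux, hv, hmid, if_pos]
        rw [ih (y + 1) (vis + 1) (by omega), hcons, helem, gScan_cons]
        simp only [hv, if_pos, hlenrest, Nat.pos_iff_ne_zero.mp hn, ite_false]
    · simp only [calcBotVisAux, hv, if_neg, not_false_iff]
      rw [hcons, helem, gScan_cons]; simp [hv]

theorem calculateVis_eq (grid : List (List Int)) (i j : Nat)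
    (hi : i < grid.length) (hj : j < (grid.getD i []).length) :
    calculateVis i j grid =
      viewDist (pvGet grid i j) ((grid.getD i []).drop (j + 1)) *
      viewDist (pvGet grid i j) (((grid.getD i []).take j).reverse) *
      viewDist (pvGet grid i j) (colUp grid i j) *
      viewDist (pvGet grid i j) (colDown grid i j) := by
  unfold calculateVis calcRightVis calcLeftVis calcTopVis calcBotVis
  rw [calcRightVisAux_eq _ _ _ _ 0 1 (by omega),
      calcLeftVisAux_eq _ _ _ (by omega) _ 0 1 (by omega),
      calcTopVisAux_eq _ _ _ _ _ 0 1 (by omega),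
      calcBotVisAux_eq _ _ _ _ _ 0 1 (by omega)]
  simp only [Nat.add_zero, List.drop_zero, gScan_eq_viewDist]
  ring

-- ── B-side: correctness of the monotonic stack ──────────────────────────────

-- last index ≤ l with height ≥ h (downward linear search, the functional spec)
def lastGE (seq : List Int) (h : Int) : Nat → Option Nat
  | 0 => if h ≤ seq.getD 0 0 then some 0 else none
  | l+1 => if h ≤ seq.getD (l+1) 0 then some (l+1) else lastGE seq h l

-- last index < k with height ≥ h
def lastGEB (seq : List Int) (h : Int) : Nat → Option Nat
  | 0 => none
  | k+1 => lastGE seq h k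

-- previous greater-or-equal index of k
def pge (seq : List Int) (k : Nat) : Option Nat := lastGEB seq (seq.getD k 0) k

theorem lastGE_some_le (seq : List Int) (h : Int) :
    ∀ l m, lastGE seq h l = some m → m ≤ l := by
  intro l
  induction l with
  | zero => intro m hm; simp only [lastGE] at hm; split at hm <;> simp_all
  | succ l ih =>
    intro m hm; simp only [lastGE] at hm
    split at hm
    · simp_all
    · exact le_trans (ih m hm) (by omega)

theorem pge_lt (seq : List Int) {k m : Nat} (h : pge seq k = some m) : m < k := by
  cases k with
  | zero => simp [pge, lastGEB] at h
  | succ k => exact Nat.lt_succ_of_le (lastGE_some_le seq _ k m h)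

theorem lastGE_some_gap (seq : List Int) (h : Int) :
    ∀ l m, lastGE seq h l = some m → ∀ x, m < x → x ≤ l → seq.getD x 0 < h := by
  intro l
  induction l with
  | zero => intro m hm x h1 h2; omega
  | succ l ih =>
    intro m hm x h1 h2
    simp only [lastGE] at hm
    split at hm
    · exfalso; injection hm with he; omega
    · rename_i hcond
      rcases Nat.lt_or_ge x (l+1) with hx | hx
      · exact ih m hm x h1 (by omega)
      · have hxe : x = l + 1 := by omega
        subst hxe
        exact lt_of_not_ge hcond

theorem lastGE_none_forall (seq : List Int) (h : Int) :
    ∀ l, lastGE seq h l = none → ∀ x ≤ l, seq.getD x 0 < h := by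
  intro l
  induction l with
  | zero =>
    intro hm x hx
    simp only [lastGE] at hm; split at hm
    · simp_all
    · next hc => interval_cases x; exact lt_of_not_ge hc
  | succ l ih =>
    intro hm x hx
    simp only [lastGE] at hm; split at hm
    · simp_all
    · next hc =>
      rcases Nat.lt_or_ge x (l+1) with h1 | h1
      · exact ih hm x (by omega)
      · have : x = l + 1 := by omega
        subst this; exact lt_of_not_ge hc

theorem lastGE_skip (seq : List Int) (h : Int) (m : Nat) :
    ∀ r, m ≤ r → (∀ x, m < x → x ≤ r → seq.getD x 0 < h) →
      lastGE seq h r = lastGE seq h m := by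
  intro r
  induction r with
  | zero => intro h1 _; interval_cases m; rfl
  | succ r ih =>
    intro h1 h2
    rcases Nat.lt_or_ge m (r+1) with hm | hm
    · have hlt : seq.getD (r+1) 0 < h := h2 (r+1) (by omega) (le_refl _)
      have : lastGE seq h (r+1) = lastGE seq h r := by
        simp only [lastGE]; rw [if_neg (not_le.mpr hlt)]
      rw [this]; exact ih (by omega) (fun x hx1 hx2 => h2 x hx1 (by omega))
    · have : m = r + 1 := by omega
      subst this; rfl

theorem lastGE_none_of (seq : List Int) (h : Int) :
    ∀ r, (∀ x ≤ r, seq.getD x 0 < h) → lastGE seq h r = none := by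
  intro r
  induction r with
  | zero => intro hall; simp only [lastGE]; rw [if_neg (not_le.mpr (hall 0 (le_refl _)))]
  | succ r ih =>
    intro hall
    simp only [lastGE]; rw [if_neg (not_le.mpr (hall (r+1) (le_refl _)))]
    exact ih (fun x hx => hall x (by omega))

theorem lastGE_eq_some_self (seq : List Int) (h : Int) (l : Nat)
    (hge : h ≤ seq.getD l 0) : lastGE seq h l = some l := by
  cases l with
  | zero => simp only [lastGE]; rw [if_pos hge]
  | succ n => simp only [lastGE]; rw [if_pos hge]

theorem popLoop_cons (seq : List Int) (h : Int) (t : Nat) (rest : List Nat) :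
    popLoop seq h (t :: rest) = if seq.getD t 0 < h then popLoop seq h rest else t :: rest := rfl

-- the pge-chain: exactly the content of the stack after the element at its head was pushed
def chain (seq : List Int) (l : Nat) : List Nat :=
  match hm : pge seq l with
  | none => [l]
  | some m => l :: chain seq m
termination_by l
decreasing_by exact pge_lt seq hm

def chainO (seq : List Int) : Option Nat → List Nat
  | none => []
  | some l => chain seq l

theorem chain_eq (seq : List Int) (l : Nat) :
    chain seq l = l :: chainO seq (pge seq l) := by
  rw [chain]
  split <;> simp_all [chainO]

theorem popLoop_chain (seq : List Int) (h : Int) :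
    ∀ l, popLoop seq h (chain seq l) = chainO seq (lastGE seq h l) := by
  intro l
  induction l using Nat.strong_induction_on with
  | _ l ih =>
    rw [chain_eq, popLoop_cons]
    by_cases hl : seq.getD l 0 < h
    · rw [if_pos hl]
      cases l with
      | zero =>
        have h0 : lastGE seq h 0 = none := by
          simp only [lastGE]; rw [if_neg (not_le.mpr hl)]
        have hpg : pge seq 0 = none := rfl
        rw [hpg, h0]; rfl
      | succ l' =>
        have hstep : lastGE seq h (l'+1) = lastGE seq h l' := by
          simp only [lastGE]; rw [if_neg (not_le.mpr hl)]
        rw [hstep]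
        cases hp : lastGE seq (seq.getD (l'+1) 0) l' with
        | none =>
          have hpg : pge seq (l'+1) = none := hp
          rw [hpg]
          have hall : ∀ x ≤ l', seq.getD x 0 < h :=
            fun x hx => lt_trans (lastGE_none_forall seq _ l' hp x hx) hl
          rw [lastGE_none_of seq h l' hall]; rfl
        | some m =>
          have hpg : pge seq (l'+1) = some m := hp
          rw [hpg]
          have hml : m ≤ l' := lastGE_some_le seq _ l' m hp
          have hgap : ∀ x, m < x → x ≤ l' → seq.getD x 0 < h :=
            fun x h1 h2 => lt_trans (lastGE_some_gap seq _ l' m hp x h1 h2) hl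
          rw [lastGE_skip seq h m l' hml hgap]
          exact ih m (by omega)
    · rw [if_neg hl]
      rw [lastGE_eq_some_self seq h l (not_lt.mp hl)]
      rw [show chainO seq (some l) = chain seq l from rfl, chain_eq]

-- the stack content before processing index k
def chainK (seq : List Int) : Nat → List Nat
  | 0 => []
  | k+1 => chain seq k

-- the value the stack pass emits at index k
def outSpec (seq : List Int) (k : Nat) : Int :=
  match pge seq k with
  | some m => (k : Int) - (m : Int)
  | none => (k : Int)

theorem popLoop_chainK (seq : List Int) (k : Nat) :
    popLoop seq (seq.getD k 0) (chainK seq k) = chainO seq (pge seq k) := by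
  cases k with
  | zero => simp [chainK, popLoop, pge, lastGEB, chainO]
  | succ k' => exact popLoop_chain seq (seq.getD (k'+1) 0) k'

theorem vdAux_eq (seq : List Int) :
    ∀ n k, vdAux seq (List.range' k n) (chainK seq k) = (List.range' k n).map (outSpec seq) := by
  intro n
  induction n with
  | zero => intro k; simp [vdAux]
  | succ n ih =>
    intro k
    rw [List.range'_succ]
    simp only [vdAux, List.map_cons]
    rw [popLoop_chainK]
    have hd : (match chainO seq (pge seq k) with
        | [] => (k : Int)
        | t :: _ => (k : Int) - (t : Int)) = outSpec seq k := by
      cases hp : pge seq k with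
      | none =>
        have ho : outSpec seq k = (k : Int) := by rw [outSpec, hp]
        rw [ho]
        simp only [chainO]
      | some m =>
        have ho : outSpec seq k = (k : Int) - (m : Int) := by rw [outSpec, hp]
        rw [ho]
        simp only [chainO]
        rw [chain_eq seq m]
    have hnext : (k :: chainO seq (pge seq k)) = chainK seq (k+1) := (chain_eq seq k).symm
    rw [hd, hnext, ih (k+1)]

theorem viewdists_eq (seq : List Int) :
    viewdists seq = (List.range seq.length).map (outSpec seq) := by
  rw [viewdists, List.range_eq_range']
  exact vdAux_eq seq seq.length 0

theorem viewdists_getD (seq : List Int) (k : Nat) (hk : k < seq.length) :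
    (viewdists seq).getD k 0 = outSpec seq k := by
  rw [viewdists_eq]
  rw [List.getD_eq_getElem _ 0 (by simpa using hk)]
  simp

theorem length_viewdists (seq : List Int) : (viewdists seq).length = seq.length := by
  rw [viewdists_eq]; simp

-- lowerPrefix of the reversed prefix counts back to the previous ≥ element
theorem lowerPrefix_take (seq : List Int) (h : Int) :
    ∀ k, k ≤ seq.length →
      lowerPrefix h ((seq.take k).reverse) =
        match lastGEB seq h k with
        | some m => k - 1 - m
        | none => k := by
  intro k
  induction k with
  | zero => intro _; simp [lowerPrefix, lastGEB]
  | succ k ih =>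
    intro hk
    have hklen : k < seq.length := by omega
    have htake : seq.take (k+1) = seq.take k ++ [seq[k]] := by
      rw [List.take_add_one]; simp [List.getElem?_eq_getElem hklen]
    rw [htake, List.reverse_append]
    simp only [List.reverse_cons, List.reverse_nil, List.nil_append,
      List.cons_append]
    have hgd : seq.getD k 0 = seq[k] := List.getD_eq_getElem seq 0 hklen
    by_cases hge : seq[k] ≥ h
    · have : lastGEB seq h (k+1) = some k := by
        simp only [lastGEB]; exact lastGE_eq_some_self seq h k (by rw [hgd]; exact hge)
      rw [this]
      show (if seq[k] ≥ h then 0 else lowerPrefix h ((seq.take k).reverse) + 1) = k + 1 - 1 - k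
      rw [if_pos hge]
      omega
    · have hlow : seq.getD k 0 < h := by rw [hgd]; exact lt_of_not_ge hge
      have hstep : lastGEB seq h (k+1) = lastGEB seq h k := by
        cases k with
        | zero =>
          simp only [lastGEB, lastGE]
          rw [if_neg (not_le.mpr hlow)]
        | succ k' =>
          simp only [lastGEB, lastGE]
          rw [if_neg (not_le.mpr hlow)]
      rw [hstep]
      simp only [lowerPrefix, hge, ite_false]
      rw [ih (by omega)]
      cases hp : lastGEB seq h k with
      | none => rfl
      | some m =>
        have hm : m < k := by
          cases k with
          | zero => simp [lastGEB] at hp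
          | succ k' => exact Nat.lt_succ_of_le (lastGE_some_le seq h k' m hp)
        show k - 1 - m + 1 = k + 1 - 1 - m
        omega

theorem outSpec_viewDist (seq : List Int) (k : Nat) (hk : k < seq.length) :
    max (outSpec seq k) 1 = viewDist (seq.getD k 0) ((seq.take k).reverse) := by
  have hlen : ((seq.take k).reverse).length = k := by
    simp [List.length_take]; omega
  have hlp := lowerPrefix_take seq (seq.getD k 0) k (by omega)
  have hpge : pge seq k = lastGEB seq (seq.getD k 0) k := rfl
  cases hp : lastGEB seq (seq.getD k 0) k with
  | none =>
    have ho : outSpec seq k = (k : Int) := by rw [outSpec, hpge, hp]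
    have hlp' : lowerPrefix (seq.getD k 0) ((seq.take k).reverse) = k := by rw [hlp, hp]
    rw [ho]
    unfold viewDist
    simp only [hlp', hlen]
    rw [if_neg (by omega)]
  | some m =>
    have hm : m < k := by
      cases k with
      | zero => simp [lastGEB] at hp
      | succ k' => exact Nat.lt_succ_of_le (lastGE_some_le seq _ k' m hp)
    have ho : outSpec seq k = (k : Int) - (m : Int) := by rw [outSpec, hpge, hp]
    have hlp' : lowerPrefix (seq.getD k 0) ((seq.take k).reverse) = k - 1 - m := by rw [hlp, hp]
    rw [ho]
    unfold viewDist
    simp only [hlp', hlen]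
    rw [if_pos (by omega)]
    rw [max_eq_left (by omega : (1:Int) ≤ (k : Int) - (m : Int))]
    omega

-- ── gluing: B's staged arrays give exactly A's four viewDist factors ────────

theorem getD_map_lists (l : List (List Int)) (f : List Int → List Int) (i : Nat)
    (hi : i < l.length) : (l.map f).getD i [] = f (l.getD i []) := by
  rw [List.getD_eq_getElem _ [] (by simpa using hi), List.getElem_map,
    List.getD_eq_getElem l [] hi]

theorem getD_reverse (xs : List Int) (k : Nat) (hk : k < xs.length) :
    (xs.reverse).getD k 0 = xs.getD (xs.length - 1 - k) 0 := by
  rw [List.getD_eq_getElem _ 0 (by simpa using hk), List.getElem_reverse,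
    List.getD_eq_getElem xs 0 (by omega)]

theorem take_col (grid : List (List Int)) (i j : Nat) (hi : i ≤ grid.length) :
    ((grid.map (fun row => row.getD j 0)).take i).reverse = colUp grid i j := by
  unfold colUp
  congr 1
  apply List.ext_getElem
  · simp; omega
  · intro k h1 h2
    have hk : k < grid.length := by simp at h1; omega
    simp only [List.getElem_take, List.getElem_map, List.getElem_range]
    rw [List.getD_eq_getElem grid [] hk]

theorem drop_col (grid : List (List Int)) (i j : Nat) :
    (grid.map (fun row => row.getD j 0)).drop (i+1) = colDown grid i j := by
  unfold colDown
  apply List.ext_getElem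
  · simp
  · intro k h1 h2
    have hk : i + 1 + k < grid.length := by simp at h1; omega
    simp only [List.getElem_drop, List.getElem_map, List.getElem_range', one_mul]
    rw [List.getD_eq_getElem grid [] hk]

theorem rev_take_drop (xs : List Int) (j : Nat) (hj : j < xs.length) :
    ((xs.reverse).take (xs.length - 1 - j)).reverse = xs.drop (j+1) := by
  rw [List.take_reverse, List.reverse_reverse,
    show xs.length - (xs.length - 1 - j) = j + 1 by omega]

theorem findBestTree_eq_alt (grid : List (List Int)) (hpre : Pre_findBestTree grid) :
    findBestTree grid = findBestTree_alt grid := by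
  unfold findBestTree findBestTree_alt
  apply PySem.List.foldl_congr_mem
  intro acc i hi
  have hi' : i < grid.length := List.mem_range.mp hi
  try dsimp only
  apply PySem.List.foldl_congr_mem
  intro acc2 j hj
  have hj' : j < (grid.getD i []).length := List.mem_range.mp hj
  try dsimp only
  set row := grid.getD i [] with hrow
  have hrowmem : row ∈ grid := by rw [hrow, List.getD_eq_getElem grid [] hi']; exact List.getElem_mem hi'
  have hm : row.length = (grid.headD []).length := hpre row hrowmem
  have hjm : j < (grid.headD []).length := by omega
  set h := row.getD j 0 with hh
  -- the four factors
  have hL : max ((viewdists row).getD j 0) 1 = viewDist h ((row.take j).reverse) := by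
    rw [viewdists_getD row j hj']; exact outSpec_viewDist row j hj'
  have hR : max (((viewdists row.reverse).reverse).getD j 0) 1 = viewDist h (row.drop (j+1)) := by
    have hlenvr : ((viewdists row.reverse)).length = row.length := by
      rw [length_viewdists]; simp
    rw [getD_reverse _ j (by rw [hlenvr]; exact hj')]
    rw [hlenvr]
    rw [viewdists_getD _ _ (by simp; omega)]
    rw [outSpec_viewDist _ _ (by simp; omega)]
    congr 1
    · rw [getD_reverse row (row.length - 1 - j) (by omega)]
      congr 1; omega
    · exact rev_take_drop row j hj'
  set col := grid.map (fun row => row.getD j 0) with hcol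
  have hcollen : col.length = grid.length := by simp [hcol]
  have hcolget : col.getD i 0 = h := by
    rw [hh, hcol, hrow]
    rw [List.getD_eq_getElem _ 0 (by simpa using hi'), List.getElem_map,
      List.getD_eq_getElem grid [] hi']
  have hU : max ((viewdists col).getD i 0) 1 = viewDist h (colUp grid i j) := by
    rw [viewdists_getD col i (by omega), outSpec_viewDist col i (by omega)]
    rw [hcolget, ← take_col grid i j (by omega)]
  have hD : max (((viewdists col.reverse).reverse).getD i 0) 1 = viewDist h (colDown grid i j) := by
    have hlenvr : ((viewdists col.reverse)).length = col.length := by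
      rw [length_viewdists]; simp
    rw [getD_reverse _ i (by omega)]
    rw [hlenvr]
    rw [viewdists_getD _ _ (by simp; omega)]
    rw [outSpec_viewDist _ _ (by simp; omega)]
    rw [← drop_col grid i j, ← hcol]
    congr 1
    · rw [getD_reverse col (col.length - 1 - i) (by omega)]
      rw [show col.length - 1 - (col.length - 1 - i) = i by omega]
      exact hcolget
    · exact rev_take_drop col i (by omega)
  -- resolve B's array lookups to the viewdists terms above
  have hleft : ((grid.map (fun r => viewdists r)).getD i []) = viewdists row :=
    getD_map_lists grid _ i hi'
  have hright : ((grid.map (fun r => (viewdists r.reverse).reverse)).getD i []) =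
      (viewdists row.reverse).reverse := getD_map_lists grid _ i hi'
  have hcols : (((List.range (grid.headD []).length).map
      (fun j => grid.map (fun row => row.getD j 0))).getD j []) = col := by
    rw [List.getD_eq_getElem _ [] (by simpa using hjm)]
    simp [hcol]
  have hup : (((List.range (grid.headD []).length).map
      (fun j => grid.map (fun row => row.getD j 0))).map (fun c => viewdists c)).getD j []
      = viewdists col := by
    rw [getD_map_lists _ _ j (by simpa using hjm), hcols]
  have hdown : (((List.range (grid.headD []).length).map
      (fun j => grid.map (fun row => row.getD j 0))).map
        (fun c => (viewdists c.reverse).reverse)).getD j []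
      = (viewdists col.reverse).reverse := by
    rw [getD_map_lists _ _ j (by simpa using hjm), hcols]
  rw [hleft, hright, hup, hdown]
  rw [calculateVis_eq grid i j hi' hj']
  have hpv : pvGet grid i j = h := rfl
  rw [hpv, ← hrow, hL, hR, hU, hD]
  rcases max_cases acc2 (viewDist h ((row.take j).reverse) * viewDist h (row.drop (j+1)) *
    viewDist h (colUp grid i j) * viewDist h (colDown grid i j)) with ⟨he, hc⟩ | ⟨he, hc⟩ <;>
    · rw [mul_comm (viewDist h ((row.take j).reverse)) (viewDist h (row.drop (j+1)))] at he ⊢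
      split_ifs <;> nlinarith [he]

-- ===== VERDICT (by name: the statement is the Claim_ definition above) =====
theorem findBestTree_spec : Claim_equal_findBestTree := by
  intro grid _ hpre
  unfold Spec_findBestTree
  exact findBestTree_eq_alt grid hpre
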